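-- pv_equiv track=rewrite | github.com/awishnap/stackdiff | stackdiff/highlighter.py | _context_keys
-- ===== SOURCE A (Python) =====
-- from typing import Dict, List, Optional
--
-- def _context_keys(all_keys: List[str], changed: set, context: int) -> set:
--     """Return keys within *context* positions of any changed key."""
--     indices = {i for i, k in enumerate(all_keys) if k in changed}
--     result: set = set()
--     for idx in indices:
--         for offset in range(-context, context + 1):
--             j = idx + offset
--             if 0 <= j < len(all_keys):
--                 result.add(all_keys[j])
--     return result
-- ===== SOURCE B (Python) =====
-- def _context_keys(all_keys, changed, context):
--     """Return keys within *context* positions of any changed key."""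
--     idxs = [i for i, k in enumerate(all_keys) if k in changed]
--     return {k for j, k in enumerate(all_keys)
--             if any(abs(j - i) <= context for i in idxs)}
-- ===== Notes on version B (the rewrite author's own statement) =====
-- stated objective: simpler
-- what changed: A expands a window of offsets around every changed index and unions the windows; B does one position-order sweep over the list, keeping each key whose position is within context of some changed index.
import Mathlib
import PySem

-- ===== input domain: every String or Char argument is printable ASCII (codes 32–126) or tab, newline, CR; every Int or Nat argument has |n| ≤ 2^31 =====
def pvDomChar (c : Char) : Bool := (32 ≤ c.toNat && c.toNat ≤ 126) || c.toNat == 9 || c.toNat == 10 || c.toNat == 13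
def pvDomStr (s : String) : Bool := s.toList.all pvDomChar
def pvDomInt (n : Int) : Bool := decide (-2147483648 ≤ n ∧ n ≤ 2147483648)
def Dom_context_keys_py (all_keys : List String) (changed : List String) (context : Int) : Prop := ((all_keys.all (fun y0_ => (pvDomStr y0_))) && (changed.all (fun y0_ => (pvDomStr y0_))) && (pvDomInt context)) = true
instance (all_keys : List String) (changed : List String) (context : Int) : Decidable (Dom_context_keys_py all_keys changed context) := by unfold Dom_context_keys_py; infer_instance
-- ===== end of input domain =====

-- B replaces A's per-changed-index window expansion by a single position-order sweep that keeps
-- each key whose position is within `context` of some changed index (objective: simpler).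

-- ===== PORT A =====
def context_keys_py (all_keys : List String) (changed : List String) (context : Int) : List String :=
  -- indices = {i for i, k in enumerate(all_keys) if k in changed}
  let indices : PySem.Set Int :=
    PySem.Set.ofList (((PySem.List.enumerate all_keys 0).filter (fun p => decide (p.2 ∈ changed))).map (fun p => p.1))
  -- for idx in indices: for offset in range(-context, context+1): …
  indices.foldl
    (fun result idx =>
      (PySem.List.pyRange (-context) (context + 1) 1).foldl
        (fun result offset =>
          let j := idx + offset
          if 0 ≤ j ∧ j < (all_keys.length : Int) then
            PySem.Set.add result (PySem.List.pyGetD all_keys j "")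
          else result)
        result)
    PySem.Set.empty

-- ===== PORT B =====
def context_keys_py_alt (all_keys : List String) (changed : List String) (context : Int) : List String :=
  -- idxs = [i for i, k in enumerate(all_keys) if k in changed]
  let idxs : List Int :=
    ((PySem.List.enumerate all_keys 0).filter (fun p => decide (p.2 ∈ changed))).map (fun p => p.1)
  -- {k for j, k in enumerate(all_keys) if any(abs(j - i) <= context for i in idxs)}
  (PySem.List.enumerate all_keys 0).foldl
    (fun out p =>
      if idxs.any (fun i => decide (|p.1 - i| ≤ context)) then PySem.Set.add out p.2 else out)
    PySem.Set.empty

-- ===== PRECONDITION & SPEC =====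
def Spec_context_keys_py (all_keys : List String) (changed : List String) (context : Int) (out : List String) : Prop := out = context_keys_py_alt all_keys changed context
instance (all_keys : List String) (changed : List String) (context : Int) (out : List String) : Decidable (Spec_context_keys_py all_keys changed context out) := by unfold Spec_context_keys_py; infer_instance

-- ===== CLAIM (what is proved, stated in full; the proofs are below) =====
def Claim_equal_context_keys_py : Prop := ∀ (all_keys : List String) (changed : List String) (context : Int), Dom_context_keys_py all_keys changed context → Spec_context_keys_py all_keys changed context (context_keys_py all_keys changed context)

-- ===== LEMMAS AND PROOFS =====

-- the key at position j (guarded in both programs, so the default never matters)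
def pvKey (all_keys : List String) (j : Int) : String := PySem.List.pyGetD all_keys j ""

-- "position j is within context of some index in idxs"
def pvCov (idxs : List Int) (c j : Int) : Bool := idxs.any (fun i => decide (i - c ≤ j ∧ j ≤ i + c))

-- canonical form both ports are reduced to: covered positions in increasing order, first-occurrence dedup
def pvCanon (all_keys : List String) (idxs : List Int) (c : Int) : List String :=
  PySem.Set.ofList (((PySem.List.pyRange 0 (all_keys.length : Int) 1).filter (pvCov idxs c)).map (pvKey all_keys))

-- A's inner loop, as a function of the accumulated set and the changed index
def pvStep (all_keys : List String) (c : Int) (result : PySem.Set String) (idx : Int) : PySem.Set String :=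
  (PySem.List.pyRange (-c) (c + 1) 1).foldl
    (fun result offset =>
      let j := idx + offset
      if 0 ≤ j ∧ j < (all_keys.length : Int) then
        PySem.Set.add result (PySem.List.pyGetD all_keys j "")
      else result)
    result

-- on a strictly increasing list, if every (q ∧ ¬p)-element lies above every p-element,
-- the (p ∨ q)-filter splits into the p-part followed by the new part
lemma pv_filter_split (p q : Int → Bool) :
    ∀ (l : List Int), l.Pairwise (· < ·) →
    (∀ j1 ∈ l, ∀ j2 ∈ l, p j1 = true → q j2 = true → p j2 = false → j1 < j2) →
    l.filter (fun j => p j || q j) = l.filter p ++ l.filter (fun j => q j && !p j) := by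
  intro l
  induction l with
  | nil => intro _ _; simp
  | cons x xs ih =>
    intro hs h
    have hs' := (List.pairwise_cons.mp hs).2
    have hlt := (List.pairwise_cons.mp hs).1
    have ih' := ih hs' (fun j1 h1 j2 h2 => h j1 (by simp [h1]) j2 (by simp [h2]))
    by_cases hp : p x = true
    · simp [hp, ih']
    · have hp' : p x = false := by simpa using hp
      by_cases hq : q x = true
      · -- no later element can satisfy p
        have hnone : xs.filter p = [] := by
          rw [List.filter_eq_nil_iff]
          intro j1 h1 hpj1
          have := h j1 (by simp [h1]) x (by simp) hpj1 hq hp'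
          have := hlt j1 h1
          omega
        have hnone' : (x :: xs).filter p = [] := by simp [hp', hnone]
        rw [hnone']
        simp only [List.filter_cons, hp', hq]
        simp only [Bool.false_or, Bool.not_false, Bool.and_true, List.nil_append]
        rw [ih', hnone]
        simp
      · have hq' : q x = false := by simpa using hq
        simp [hp', hq', ih']

-- adding elements already present changes nothing
lemma pv_update_of_subset (S : PySem.Set String) :
    ∀ (xs : List String), (∀ x ∈ xs, x ∈ S) → PySem.Set.update S xs = S := by
  intro xs
  induction xs generalizing S with
  | nil => intro _; rfl
  | cons x xs ih =>
    intro h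
    rw [PySem.Set.update_cons, PySem.Set.add_of_mem (h x (by simp))]
    exact ih S (fun y hy => h y (by simp [hy]))

-- two strictly increasing Int lists with the same members are equal
lemma pv_eq_of_mem_iff {l1 l2 : List Int} (h1 : l1.Pairwise (· < ·)) (h2 : l2.Pairwise (· < ·))
    (h : ∀ x, x ∈ l1 ↔ x ∈ l2) : l1 = l2 := by
  have hn1 : l1.Nodup := h1.imp ne_of_lt
  have hn2 : l2.Nodup := h2.imp ne_of_lt
  have hperm : l1.Perm l2 := (List.perm_ext_iff_of_nodup hn1 hn2).mpr h
  exact hperm.eq_of_pairwise (fun a b _ _ hab hba => le_antisymm hab hba)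
    (h1.imp le_of_lt) (h2.imp le_of_lt)

-- A's inner loop = appending the keys of the clipped window, in increasing position order
lemma pv_foldl_shift (f : PySem.Set String → Int → PySem.Set String) (a b t : Int) (S : PySem.Set String) :
    (PySem.List.pyRange a b 1).foldl (fun r x => f r (t + x)) S =
      (PySem.List.pyRange (t + a) (t + b) 1).foldl f S := by
  rw [PySem.List.pyRange_one, PySem.List.pyRange_one, List.foldl_map, List.foldl_map]
  have h : (t + b - (t + a)) = (b - a) := by ring
  rw [h]
  congr 1
  funext r k
  rw [← add_assoc]

lemma pv_window_eq (all_keys : List String) (c idx : Int) :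
    ((PySem.List.pyRange 0 (all_keys.length : Int) 1).filter
        (fun j => decide (idx - c ≤ j ∧ j ≤ idx + c))) =
      ((PySem.List.pyRange (idx - c) (idx + c + 1) 1).filter
        (fun j => decide (0 ≤ j ∧ j < (all_keys.length : Int)))) := by
  apply pv_eq_of_mem_iff
  · exact List.Pairwise.sublist List.filter_sublist (PySem.List.pairwise_lt_pyRange_one _ _)
  · exact List.Pairwise.sublist List.filter_sublist (PySem.List.pairwise_lt_pyRange_one _ _)
  · intro x
    simp only [List.mem_filter, PySem.List.mem_pyRange_one, decide_eq_true_eq]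
    omega

lemma pv_step_eq (all_keys : List String) (c : Int) (S : PySem.Set String) (idx : Int) :
    pvStep all_keys c S idx =
      PySem.Set.update S
        (((PySem.List.pyRange 0 (all_keys.length : Int) 1).filter
            (fun j => decide (idx - c ≤ j ∧ j ≤ idx + c))).map (pvKey all_keys)) := by
  unfold pvStep
  rw [pv_window_eq]
  have hs := pv_foldl_shift
    (fun r j => if 0 ≤ j ∧ j < (all_keys.length : Int) then
        PySem.Set.add r (PySem.List.pyGetD all_keys j "") else r)
    (-c) (c + 1) idx S
  have h1 : idx + -c = idx - c := by ring
  have h2 : idx + (c + 1) = idx + c + 1 := by ring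
  rw [h1, h2] at hs
  rw [hs, PySem.List.foldl_ite_eq_foldl_filter, ← PySem.Set.update_map_eq_foldl_add]
  rfl

-- main A-side characterization
-- every position covered by an earlier changed index lies strictly below every position of
-- i's window that is not covered by the earlier indices
lemma pv_below (ys : List Int) (c i : Int) (hlt : ∀ y ∈ ys, y < i) :
    ∀ j1 j2 : Int, pvCov ys c j1 = true → decide (i - c ≤ j2 ∧ j2 ≤ i + c) = true →
      pvCov ys c j2 = false → j1 < j2 := by
  intro j1 j2 h1 h2 h3
  unfold pvCov at h1 h3
  rw [List.any_eq_true] at h1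
  obtain ⟨i0, hi0, hj1⟩ := h1
  rw [decide_eq_true_eq] at h2 hj1
  by_contra hle
  rw [Int.not_lt] at hle
  have : ys.any (fun i => decide (i - c ≤ j2 ∧ j2 ≤ i + c)) = true := by
    rw [List.any_eq_true]
    exact ⟨i0, hi0, by have := hlt i0 hi0; rw [decide_eq_true_eq]; omega⟩
  rw [this] at h3
  exact absurd h3 (by simp)

lemma pv_foldA_eq (all_keys : List String) (c : Int) :
    ∀ (idxs : List Int), idxs.Pairwise (· < ·) →
      idxs.foldl (pvStep all_keys c) PySem.Set.empty = pvCanon all_keys idxs c := by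
  intro idxs
  induction idxs using List.reverseRecOn with
  | nil =>
    intro _
    unfold pvCanon
    have h : List.filter (pvCov [] c) (PySem.List.pyRange 0 (all_keys.length : Int) 1) = [] :=
      List.filter_eq_nil_iff.mpr (by intro j _; simp [pvCov])
    rw [h]
    rfl
  | append_singleton ys i ih =>
    intro hs
    have hys : ys.Pairwise (· < ·) :=
      List.Pairwise.sublist (List.sublist_append_left _ _) hs
    have hlt : ∀ y ∈ ys, y < i := by
      intro y hy
      exact (List.pairwise_append.mp hs).2.2 y hy i (by simp)
    rw [List.foldl_append, List.foldl_cons, List.foldl_nil, ih hys, pv_step_eq]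
    -- notation
    set n : Int := (all_keys.length : Int) with hn
    set p : Int → Bool := pvCov ys c with hp
    set q : Int → Bool := fun j => decide (i - c ≤ j ∧ j ≤ i + c) with hq
    set l : List Int := PySem.List.pyRange 0 n 1 with hl
    have hpl : l.Pairwise (· < ·) := PySem.List.pairwise_lt_pyRange_one _ _
    have hbelow := pv_below ys c i hlt
    -- the window splits into the already-covered prefix and the new suffix
    have hWsplit : l.filter q = l.filter (fun j => q j && p j) ++ l.filter (fun j => q j && !p j) := by
      have h := pv_filter_split (fun j => q j && p j) q l hpl (by
        intro j1 _ j2 _ hp1 hq2 hp2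
        simp only [Bool.and_eq_true] at hp1
        simp only [hq2, Bool.true_and] at hp2
        exact hbelow j1 j2 hp1.2 hq2 hp2)
      have e1 : (fun j => (q j && p j) || q j) = q := by funext j; cases q j <;> cases p j <;> rfl
      have e2 : (fun j => q j && !(q j && p j)) = (fun j => q j && !p j) := by
        funext j; cases q j <;> cases p j <;> rfl
      rw [e1, e2] at h
      exact h
    -- the covered part of the window adds nothing
    have hold : PySem.Set.update (pvCanon all_keys ys c)
        ((l.filter (fun j => q j && p j)).map (pvKey all_keys)) = pvCanon all_keys ys c := by
      apply pv_update_of_subset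
      intro x hx
      rw [List.mem_map] at hx
      obtain ⟨j, hj, rfl⟩ := hx
      rw [List.mem_filter, Bool.and_eq_true] at hj
      unfold pvCanon
      rw [PySem.Set.mem_ofList]
      exact List.mem_map_of_mem (List.mem_filter.mpr ⟨hj.1, hj.2.2⟩)
    -- the union-of-windows filter splits into old part and new part
    have hsplit := pv_filter_split p q l hpl (by
      intro j1 _ j2 _ h1 h2 h3
      exact hbelow j1 j2 h1 h2 h3)
    have hcov : pvCov (ys ++ [i]) c = fun j => p j || q j := by
      funext j
      unfold pvCov
      rw [List.any_append]
      simp [hp, hq, pvCov]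
    calc PySem.Set.update (pvCanon all_keys ys c) ((l.filter q).map (pvKey all_keys))
        = PySem.Set.update (pvCanon all_keys ys c)
            ((l.filter (fun j => q j && p j)).map (pvKey all_keys) ++
             (l.filter (fun j => q j && !p j)).map (pvKey all_keys)) := by
          rw [hWsplit, List.map_append]
      _ = PySem.Set.update (pvCanon all_keys ys c)
            ((l.filter (fun j => q j && !p j)).map (pvKey all_keys)) := by
          rw [PySem.Set.update_append, hold]
      _ = pvCanon all_keys (ys ++ [i]) c := by
          unfold pvCanon
          rw [hcov, hsplit, List.map_append, PySem.Set.ofList_append]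

lemma pv_A_eq (all_keys : List String) (changed : List String) (context : Int) :
    context_keys_py all_keys changed context =
      pvCanon all_keys
        (((PySem.List.enumerate all_keys 0).filter (fun p => decide (p.2 ∈ changed))).map (fun p => p.1))
        context := by
  simp only [context_keys_py]
  have hpair : ((((PySem.List.enumerate all_keys 0).filter
      (fun p => decide (p.2 ∈ changed))).map (fun p => p.1)) : List Int).Pairwise (· < ·) := by
    rw [List.pairwise_map]
    exact List.Pairwise.sublist List.filter_sublist (PySem.List.pairwise_lt_enumerate _ _)
  rw [PySem.Set.ofList_eq_self_of_nodup _ (hpair.imp fun hab => ne_of_lt hab)]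
  exact pv_foldA_eq all_keys context _ hpair

lemma pv_B_eq (all_keys : List String) (changed : List String) (context : Int) :
    context_keys_py_alt all_keys changed context =
      pvCanon all_keys
        (((PySem.List.enumerate all_keys 0).filter (fun p => decide (p.2 ∈ changed))).map (fun p => p.1))
        context := by
  simp only [context_keys_py_alt]
  set idxs : List Int :=
    ((PySem.List.enumerate all_keys 0).filter (fun p => decide (p.2 ∈ changed))).map (fun p => p.1)
    with hidx
  rw [PySem.List.enumerate_eq_map_pyRange all_keys "", List.foldl_map,
      PySem.List.foldl_ite_eq_foldl_filter, ← PySem.Set.update_map_eq_foldl_add]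
  have hcond : ∀ j : Int,
      (idxs.any (fun i => decide (|j - i| ≤ context))) = pvCov idxs context j := by
    intro j
    unfold pvCov
    congr 1
    funext i
    rw [decide_eq_decide, abs_le]
    omega
  unfold pvCanon pvKey
  rw [PySem.Set.update_empty]
  simp only [PySem.List.len_eq]
  congr 1
  congr 1
  apply List.filter_congr
  intro j _
  simp only [Bool.decide_coe]
  exact hcond j

-- ===== VERDICT (by name: the statement is the Claim_ definition above) =====
theorem context_keys_py_spec : Claim_equal_context_keys_py := by
  intro all_keys changed context _
  unfold Spec_context_keys_py
  rw [pv_A_eq, pv_B_eq]
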